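-- pv_equiv track=rewrite | github.com/Tjcs23/CodeWars-Challenges | 8kyu/ShortestWord.py | find_short
-- ===== SOURCE A (Python) =====
-- def find_short(s):
--     # your code here
--     l = []
--     count = 0
--     for x in s:
--         if x == " ":
--             l.append(count)
--             count = 0
--         else:
--             count+=1
--     l.append(count)
--     return min(l) # l: shortest word length
-- ===== SOURCE B (Python) =====
-- def find_short(s):
--     return min(len(w) for w in s.split(" "))
-- ===== Notes on version B (the rewrite author's own statement) =====
-- stated objective: idiomatic
-- what changed: B replaces A's per-character counter loop with a space-separator split and a min over word lengths (word-level traversal via the library).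
import Mathlib
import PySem

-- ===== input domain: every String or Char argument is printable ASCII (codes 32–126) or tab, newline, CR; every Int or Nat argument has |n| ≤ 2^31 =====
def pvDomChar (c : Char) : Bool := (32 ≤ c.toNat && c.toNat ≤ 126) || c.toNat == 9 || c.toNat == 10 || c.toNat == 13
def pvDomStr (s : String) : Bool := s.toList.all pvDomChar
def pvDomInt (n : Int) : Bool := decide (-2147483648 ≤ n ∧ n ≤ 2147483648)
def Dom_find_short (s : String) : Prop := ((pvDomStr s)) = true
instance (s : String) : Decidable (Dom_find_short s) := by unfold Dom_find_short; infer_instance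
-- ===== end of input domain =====

-- B replaces A's per-character counter loop with split(" ") + min over word lengths; objective: idiomatic.

-- ===== PORT A =====
-- literal port of A's loop: accumulate finished word lengths in l, running count, append final count, min
def find_short (s : String) : Int :=
  let p := s.toList.foldl
    (fun (st : List Int × Int) x =>
      if x = ' ' then (st.1 ++ [st.2], 0) else (st.1, st.2 + 1))
    ([], 0)
  let l := p.1 ++ [p.2]
  (PySem.List.min? l (fun x => x)).getD 0   -- min(l); l is always nonempty so Python's min never raises

-- ===== PORT B =====
-- port of Source B: min(len(w) for w in s.split(" ")); s.split(" ") = Chars.splitOn on [' '] (sep nonempty)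
def find_short_alt (s : String) : Int :=
  let words := PySem.Chars.splitOn s.toList [' ']
  (PySem.List.min? (words.map (fun w => (w.length : Int))) (fun x => x)).getD 0

-- ===== PRECONDITION & SPEC =====
def Spec_find_short (s : String) (out : Int) : Prop := out = find_short_alt s
instance (s : String) (out : Int) : Decidable (Spec_find_short s out) := by unfold Spec_find_short; infer_instance

-- ===== CLAIM (what is proved, stated in full; the proofs are below) =====
def Claim_equal_find_short : Prop := ∀ (s : String), Dom_find_short s → Spec_find_short s (find_short s)

-- ===== LEMMAS AND PROOFS =====

-- lengths of the space-separated tokens of cs (common characterisation of both ports)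
def pvBump (k : Int) : List Int → List Int
  | [] => []
  | h :: t => (k + h) :: t

def pvLens : List Char → List Int
  | [] => [0]
  | c :: t => if c = ' ' then 0 :: pvLens t else pvBump 1 (pvLens t)

theorem pvLens_ne_nil (cs : List Char) : pvLens cs ≠ [] := by
  induction cs with
  | nil => simp [pvLens]
  | cons c t ih =>
    simp only [pvLens]
    split
    · simp
    · cases h : pvLens t with
      | nil => exact absurd h ih
      | cons a b => simp [pvBump]

theorem pvBump_zero (cs : List Char) : pvBump 0 (pvLens cs) = pvLens cs := by
  cases h : pvLens cs with
  | nil => exact absurd h (pvLens_ne_nil cs)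
  | cons a b => simp [pvBump]

theorem pvBump_bump (a b : Int) (xs : List Int) : pvBump a (pvBump b xs) = pvBump (a + b) xs := by
  cases xs with
  | nil => rfl
  | cons h t => simp [pvBump]; ring

-- A's loop computes l ++ [count] = prefix ++ bumped token lengths
theorem pvFoldA (cs : List Char) : ∀ (l : List Int) (count : Int),
    (cs.foldl (fun (st : List Int × Int) x =>
        if x = ' ' then (st.1 ++ [st.2], 0) else (st.1, st.2 + 1)) (l, count)).1
      ++ [(cs.foldl (fun (st : List Int × Int) x =>
        if x = ' ' then (st.1 ++ [st.2], 0) else (st.1, st.2 + 1)) (l, count)).2]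
      = l ++ pvBump count (pvLens cs) := by
  induction cs with
  | nil => intro l count; simp [pvLens, pvBump]
  | cons c t ih =>
    intro l count
    by_cases hc : c = ' '
    · subst hc
      rw [List.foldl_cons, if_pos rfl, ih, pvBump_zero]
      simp [pvLens, pvBump]
    · rw [List.foldl_cons, if_neg hc, ih]
      simp only [pvLens, hc, if_false, pvBump_bump]

-- B's split: token lengths of splitOn.go
theorem pvGoLens (cs : List Char) : ∀ (fuel : Nat) (cur : List Char) (acc : List (List Char)),
    cs.length ≤ fuel →
    (PySem.Chars.splitOn.go [' '] fuel cs cur acc).map (fun w => (w.length : Int))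
      = acc.reverse.map (fun w => (w.length : Int)) ++ pvBump (cur.length : Int) (pvLens cs) := by
  induction cs with
  | nil =>
    intro fuel cur acc _
    cases fuel with
    | zero => simp [PySem.Chars.splitOn.go, pvLens, pvBump]
    | succ n => simp [PySem.Chars.splitOn.go, pvLens, pvBump]
  | cons c t ih =>
    intro fuel cur acc hf
    cases fuel with
    | zero => simp at hf
    | succ n =>
      simp only [List.length_cons] at hf
      have hrec := ih n
      by_cases hc : c = ' '
      · have hpre : [' '].isPrefixOf (c :: t) = true := by
          simp [List.isPrefixOf, hc]
        rw [PySem.Chars.splitOn.go]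
        simp only [hpre, if_true]
        rw [show List.drop [' '].length (c :: t) = t by simp]
        rw [hrec [] (cur.reverse :: acc) (Nat.le_of_succ_le_succ hf)]
        simp only [pvLens, hc, if_true, pvBump, List.reverse_cons, List.map_append, List.map_cons,
          List.map_nil, List.length_reverse, List.length_nil, Nat.cast_zero, List.append_assoc,
          List.cons_append, List.nil_append, zero_add]
        cases h : pvLens t with
        | nil => exact absurd h (pvLens_ne_nil t)
        | cons a b => rfl
      · have hpre : [' '].isPrefixOf (c :: t) = false := by
          simp [List.isPrefixOf]
          exact fun h => absurd h.symm hc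
        rw [PySem.Chars.splitOn.go]
        simp only [hpre, Bool.false_eq_true, if_false]
        rw [hrec (c :: cur) acc (Nat.le_of_succ_le_succ hf)]
        simp only [pvLens, hc, if_false, pvBump_bump]
        rw [show ((c :: cur).length : Int) = 1 + cur.length by push_cast [List.length_cons]; ring,
          add_comm (1 : Int) (cur.length : Int)]

theorem pvSplitLens (cs : List Char) :
    (PySem.Chars.splitOn cs [' ']).map (fun w => (w.length : Int)) = pvLens cs := by
  unfold PySem.Chars.splitOn
  rw [pvGoLens cs (cs.length + 1) [] [] (Nat.le_succ _)]
  simpa using pvBump_zero cs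

-- ===== VERDICT (by name: the statement is the Claim_ definition above) =====
theorem find_short_spec : Claim_equal_find_short := by
  intro s _
  unfold Spec_find_short
  simp only [find_short, find_short_alt]
  rw [pvSplitLens]
  have h := pvFoldA s.toList [] 0
  simp only [List.nil_append] at h
  rw [h, pvBump_zero]
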